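-- pv_equiv track=rewrite | github.com/cisnlp/MIB-circuit-track | edge_pruning/modeling/vis_circuit_fpt2.py | sanitize_edges
-- ===== SOURCE A (Python) =====
-- from typing import Callable, List, Optional, Set, Tuple, Union
--
-- def sanitize_edges(edges: List[Tuple[str, str]]) -> List[Tuple[str, str]]:
--     """
--     Sanitize and modify a list of circuit edges by ensuring specific connectivity
--     and removing redundant or unconnected nodes.
--
--     This function performs the following operations:
--     1. Adds edges from nodes with "a" prefix that are not q, k, or v, to their
--        respective ".q", ".k", and ".v" nodes.
--     2. Iteratively removes edges where the destination node is not a source node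
--        elsewhere, excluding the "resid_post" node.
--     3. Removes q, k, v edges if they have no incoming edges and their corresponding
--        q -> o, k -> o, v -> o edges are not needed.
--
--     Args:
--         edges (List[Tuple[str, str]]): A list of tuples representing edges in the format
--             (source_node, destination_node).
--
--     Returns:
--         List[Tuple[str, str]] of tuples: A sanitized list of edges with unnecessary edges removed.
--     """
--     # First, add all q,k,v -> o edges
--     new_edges_ = set()
--     for edge in edges:
--         if edge[0][0] == "a" and edge[0][-1] not in ["q", "k", "v"]:
--             new_edges_.add(edge[0])
--     for to in new_edges_:
--         for suffix in [".q", ".k", ".v"]: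
--             from_ = to + suffix
--             edges.append((from_, to))
--     while True:
--         orig_len = len(edges)
--         # Find all nodes that are destinations but not sources
--         froms = set()
--         tos = set()
--         for edge in edges:
--             froms.add(edge[0])
--             if edge[1] != "resid_post":
--                 tos.add(edge[1])
--         banned_tos = tos.difference(froms)
--         edges = [e for e in edges if e[1] not in banned_tos]
--
--         # Find qkv nodes that have no incoming edges, and remove the q -> o edge for them
--         qkv_nodes = set()
--         for edge in edges:
--             if edge[1].endswith(".q"):
--                 qkv_nodes.add(edge[1])
--             elif edge[1].endswith(".k"):
--                 qkv_nodes.add(edge[1])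
--             elif edge[1].endswith(".v"):
--                 qkv_nodes.add(edge[1])
--
--         edges = [
--             e
--             for e in edges
--             if not (
--                 (e[0].endswith(".q") and e[0] not in qkv_nodes)
--                 or (e[0].endswith(".k") and e[0] not in qkv_nodes)
--                 or (e[0].endswith(".v") and e[0] not in qkv_nodes)
--             )
--         ]
--         if orig_len == len(edges):
--             break
--
--     return edges
-- ===== SOURCE B (Python) =====
-- from collections import Counter, defaultdict
-- from typing import List, Tuple
--
-- _QKV = (".q", ".k", ".v")
--
--
-- def sanitize_edges(edges: List[Tuple[str, str]]) -> List[Tuple[str, str]]: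
--     # Attention sources that need q/k/v feed edges, in first-seen order.
--     attn = []
--     for s, _t in edges:
--         if s.startswith("a") and not s.endswith(("q", "k", "v")) and s not in attn:
--             attn.append(s)
--     aug = list(edges)
--     for to in attn:
--         for suf in _QKV:
--             aug.append((to + suf, to))
--
--     # Worklist pruning over the distinct edges: propagate removals through
--     # degree counters and precomputed adjacency lists instead of re-filtering
--     # the whole list to a fixed point.
--     distinct = list(dict.fromkeys(aug))
--     alive = set(distinct)
--     src_cnt = Counter(s for s, _ in distinct)   # alive edges leaving each node
--     dst_cnt = Counter(t for _, t in distinct)   # alive edges entering each node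
--     into = defaultdict(list)    # into[n]: edges whose destination is n
--     outof = defaultdict(list)   # outof[n]: edges whose source is n
--     for e in distinct:
--         outof[e[0]].append(e)
--         into[e[1]].append(e)
--
--     def bad(e):
--         s, t = e
--         return (t != "resid_post" and src_cnt[t] == 0) or \
--                (s.endswith(_QKV) and dst_cnt[s] == 0)
--
--     queue = [e for e in distinct if bad(e)]
--     i = 0
--     while i < len(queue):
--         e = queue[i]
--         i += 1
--         if e not in alive or not bad(e):
--             continue
--         alive.remove(e)
--         s, t = e
--         src_cnt[s] -= 1
--         dst_cnt[t] -= 1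
--         queue.extend(into[s])    # their destination may have lost its last outgoing edge
--         queue.extend(outof[t])   # their source may have lost its last incoming edge
--     return [e for e in aug if e in alive]
-- ===== Notes on version B (the rewrite author's own statement) =====
-- stated objective: alternative
-- what changed: B replaces A's repeated whole-list filter passes to a fixed point by a worklist: degree counters (Counter of alive sources/destinations) and precomputed adjacency lists propagate each edge removal only to the edges it can invalidate, then one final filter of the augmented list restores order and duplicates.
-- outside the precondition, e.g. on sanitize_edges([('ax', 'm0'), ('ay', 'm0'), ('i', 'ax.q'), ('i', 'ay.q')]): A returns [], B returns []
import Mathlib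
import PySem

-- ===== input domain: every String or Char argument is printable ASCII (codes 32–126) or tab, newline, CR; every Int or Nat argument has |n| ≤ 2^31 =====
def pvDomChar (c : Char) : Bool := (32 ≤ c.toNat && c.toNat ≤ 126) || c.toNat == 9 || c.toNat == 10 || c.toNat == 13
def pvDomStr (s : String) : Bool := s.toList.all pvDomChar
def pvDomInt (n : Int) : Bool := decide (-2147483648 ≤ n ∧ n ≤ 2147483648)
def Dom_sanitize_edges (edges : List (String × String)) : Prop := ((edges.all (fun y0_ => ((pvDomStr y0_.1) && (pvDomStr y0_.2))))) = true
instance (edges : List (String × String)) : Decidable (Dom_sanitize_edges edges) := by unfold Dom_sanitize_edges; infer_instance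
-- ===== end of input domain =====

-- B replaces A's repeated global filter-to-fixpoint passes by a worklist: degree counters and
-- precomputed adjacency lists propagate each removal to the edges it can affect (alternative
-- algorithm; A additionally mutates its argument by appending the q/k/v edges — the equivalence
-- proved here is about the return value).


-- ===== PORT A =====
-- edge[0][0] == "a" and edge[0][-1] not in ["q","k","v"]  (Str.pyGet? = none is Python's
-- IndexError on the empty source, excluded by Pre_; the 1-char strings are ported as Chars)
def pvAttnA (s : String) : Bool :=
  match PySem.Str.pyGet? s 0, PySem.Str.pyGet? s (-1) with
  | some c0, some c1 => c0 == 'a' && !(['q', 'k', 'v'].contains c1)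
  | _, _ => false

-- one round of A's while-loop body: the banned-destination filter, then the dangling-q/k/v filter
def pvStepA (l : List (String × String)) : List (String × String) :=
  let fs := l.foldl
    (fun (p : PySem.Set String × PySem.Set String) e =>
      (PySem.Set.add p.1 e.1, if e.2 != "resid_post" then PySem.Set.add p.2 e.2 else p.2))
    (PySem.Set.empty, PySem.Set.empty)
  let banned := PySem.Set.diff fs.2 fs.1
  let l1 := l.filter (fun e => !(PySem.Set.contains banned e.2))
  let qkv := l1.foldl
    (fun (q : PySem.Set String) e =>
      if PySem.Str.endswith e.2 ".q" then PySem.Set.add q e.2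
      else if PySem.Str.endswith e.2 ".k" then PySem.Set.add q e.2
      else if PySem.Str.endswith e.2 ".v" then PySem.Set.add q e.2
      else q)
    PySem.Set.empty
  l1.filter (fun e =>
    !((PySem.Str.endswith e.1 ".q" && !(PySem.Set.contains qkv e.1))
      || (PySem.Str.endswith e.1 ".k" && !(PySem.Set.contains qkv e.1))
      || (PySem.Str.endswith e.1 ".v" && !(PySem.Set.contains qkv e.1))))

-- while True: … (fuel = one more than the list length bounds the rounds; each round that
-- does not break strictly shrinks the list, so the fuel is never exhausted)
def pvLoopA : Nat → List (String × String) → List (String × String)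
  | 0, l => l
  | fuel + 1, l =>
    let l2 := pvStepA l
    if l.length == l2.length then l2 else pvLoopA fuel l2

def sanitize_edges (edges : List (String × String)) : List (String × String) :=
  let news := edges.foldl
    (fun (acc : PySem.Set String) e => if pvAttnA e.1 then PySem.Set.add acc e.1 else acc)
    PySem.Set.empty
  let edges2 := news.foldl
    (fun l dst => [".q", ".k", ".v"].foldl (fun l suf => l ++ [(dst ++ suf, dst)]) l)
    edges
  pvLoopA (edges2.length + 1) edges2

-- ===== PORT B =====
-- s.startswith("a") and not s.endswith(("q","k","v"))
def pvAttnB (s : String) : Bool :=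
  PySem.Str.startswith s "a"
  && !(PySem.Str.endswith s "q" || PySem.Str.endswith s "k" || PySem.Str.endswith s "v")

-- bad(e): the edge currently violates a connectivity condition, read off the degree counters
def pvBad (sc dc : PySem.Dict String Int) (e : String × String) : Bool :=
  (e.2 != "resid_post" && (PySem.Dict.getD sc e.2 0 == 0))
  || ((PySem.Str.endswith e.1 ".q" || PySem.Str.endswith e.1 ".k" || PySem.Str.endswith e.1 ".v")
      && (PySem.Dict.getD dc e.1 0 == 0))

-- the scan-queue worklist: pop the head; if the edge is alive and bad, remove it, decrement its
-- endpoints' counters and enqueue the edges its removal can affect (into[e.1] ++ outof[e.2])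
def pvWork (into outof : PySem.Dict String (List (String × String))) :
    List (String × String) → PySem.Set (String × String) → PySem.Dict String Int →
    PySem.Dict String Int → PySem.Set (String × String)
  | [], alive, _, _ => alive
  | e :: rest, alive, sc, dc =>
    if h : PySem.Set.contains alive e && pvBad sc dc e then
      pvWork into outof (rest ++ PySem.Dict.getD into e.1 [] ++ PySem.Dict.getD outof e.2 [])
        (PySem.Set.discard alive e) (PySem.Dict.modify sc e.1 0 (· - 1))
        (PySem.Dict.modify dc e.2 0 (· - 1))
    else pvWork into outof rest alive sc dc
  termination_by q a _sc _dc => (a.length, q.length)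
  decreasing_by
  · apply Prod.Lex.left
    simp only [Bool.and_eq_true, PySem.Set.contains_eq_listContains, List.contains_eq_mem,
      decide_eq_true_eq] at h
    exact List.length_filter_lt_length_iff_exists.mpr ⟨e, h.1, by simp⟩
  · apply Prod.Lex.right
    simp

def sanitize_edges_alt (edges : List (String × String)) : List (String × String) :=
  let attn := edges.foldl
    (fun (acc : List String) e =>
      if pvAttnB e.1 && !(acc.contains e.1) then acc ++ [e.1] else acc)
    []
  let aug := attn.foldl
    (fun l dst => [".q", ".k", ".v"].foldl (fun l suf => l ++ [(dst ++ suf, dst)]) l)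
    edges
  let distinct := PySem.List.dedup aug          -- list(dict.fromkeys(aug))
  let alive0 := PySem.Set.ofList distinct
  let sc := PySem.Dict.counter (distinct.map Prod.fst)
  let dc := PySem.Dict.counter (distinct.map Prod.snd)
  let idx := distinct.foldl                      -- (outof, into) adjacency lists
    (fun (p : PySem.Dict String (List (String × String)) × PySem.Dict String (List (String × String))) e =>
      (p.1.modify e.1 [] (· ++ [e]), p.2.modify e.2 [] (· ++ [e])))
    (PySem.Dict.empty, PySem.Dict.empty)
  let queue0 := distinct.filter (pvBad sc dc)
  let alive := pvWork idx.2 idx.1 queue0 alive0 sc dc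
  aug.filter (fun e => PySem.Set.contains alive e)

-- ===== PRECONDITION & SPEC =====
-- does some destination feed one of s's q/k/v nodes? (only such sources can keep appended edges)
def pvFed (edges : List (String × String)) (s : String) : Bool :=
  (edges.map Prod.snd).contains (s ++ ".q") || (edges.map Prod.snd).contains (s ++ ".k")
  || (edges.map Prod.snd).contains (s ++ ".v")

-- Pre_ excludes (i) inputs containing an edge with an empty source string, on which A raises
-- IndexError, and (ii) inputs with two or more distinct attention sources that both need q/k/v
-- edges and have one of those q/k/v nodes fed by some destination: only there can appended edges
-- survive, so only there A's returned order follows Python's hash-dependent set iteration order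
-- (an accident of the implementation; B appends in first-seen order).
def Pre_sanitize_edges (edges : List (String × String)) : Prop :=
  (∀ e ∈ edges, e.1 ≠ "") ∧
  (((PySem.Set.ofList ((edges.map Prod.fst).filter pvAttnB)).filter (pvFed edges)).length ≤ 1)
instance (edges : List (String × String)) : Decidable (Pre_sanitize_edges edges) := by
  unfold Pre_sanitize_edges; infer_instance

def pvWitness_sanitize_edges : (List (String × String)) :=
  [("a0", "resid_post"), ("m0", "resid_post")]

def Spec_sanitize_edges (edges : List (String × String)) (out : List (String × String)) : Prop := out = sanitize_edges_alt edges
instance (edges : List (String × String)) (out : List (String × String)) : Decidable (Spec_sanitize_edges edges out) := by unfold Spec_sanitize_edges; infer_instance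

-- ===== CLAIM (what is proved, stated in full; the proofs are below) =====
def Claim_equal_sanitize_edges : Prop := ∀ (edges : List (String × String)), Dom_sanitize_edges edges → Pre_sanitize_edges edges → Spec_sanitize_edges edges (sanitize_edges edges)

-- ===== LEMMAS AND PROOFS =====

-- the value-level keep condition both programs enforce: the destination must be reachable
-- onward (or be resid_post) and a q/k/v source must itself be fed
def pvIsQkv (s : String) : Bool :=
  PySem.Str.endswith s ".q" || PySem.Str.endswith s ".k" || PySem.Str.endswith s ".v"

def pvKeep (l : List (String × String)) (e : String × String) : Bool :=
  (e.2 == "resid_post" || decide (e.2 ∈ l.map Prod.fst))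
  && (!(pvIsQkv e.1) || decide (e.1 ∈ l.map Prod.snd))

def pvFix (l : List (String × String)) : Prop := ∀ e ∈ l, pvKeep l e = true

theorem pvKeep_mono {l l' : List (String × String)} (h : ∀ x ∈ l, x ∈ l')
    {e : String × String} (hk : pvKeep l e = true) : pvKeep l' e = true := by
  simp only [pvKeep, Bool.and_eq_true, Bool.or_eq_true, Bool.not_eq_true',
    decide_eq_true_eq, List.mem_map] at hk ⊢
  refine ⟨?_, ?_⟩
  · rcases hk.1 with h1 | ⟨a, ha, he⟩
    · exact Or.inl h1
    · exact Or.inr ⟨a, h a ha, he⟩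
  · rcases hk.2 with h1 | ⟨a, ha, he⟩
    · exact Or.inl h1
    · exact Or.inr ⟨a, h a ha, he⟩

-- membership in the froms/tos sets A builds in one pass
theorem pvMem_fsA (l : List (String × String)) (s0 t0 : PySem.Set String) (x : String) :
    (x ∈ (l.foldl
      (fun (p : PySem.Set String × PySem.Set String) e =>
        (PySem.Set.add p.1 e.1, if e.2 != "resid_post" then PySem.Set.add p.2 e.2 else p.2))
      (s0, t0)).1 ↔ x ∈ s0 ∨ x ∈ l.map Prod.fst) ∧
    (x ∈ (l.foldl
      (fun (p : PySem.Set String × PySem.Set String) e =>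
        (PySem.Set.add p.1 e.1, if e.2 != "resid_post" then PySem.Set.add p.2 e.2 else p.2))
      (s0, t0)).2 ↔ x ∈ t0 ∨ (x ∈ l.map Prod.snd ∧ x ≠ "resid_post")) := by
  induction l generalizing s0 t0 with
  | nil => simp
  | cons e l ih =>
    simp only [List.foldl_cons]
    refine ⟨?_, ?_⟩
    · rw [(ih _ _).1]
      simp [PySem.Set.mem_add]
      tauto
    · rw [(ih (PySem.Set.add s0 e.1) (if e.2 != "resid_post" then PySem.Set.add t0 e.2 else t0)).2]
      by_cases h2 : e.2 = "resid_post"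
      · simp [h2]
        tauto
      · simp only [bne_iff_ne, ne_eq, h2, not_false_iff, if_pos, PySem.Set.mem_add,
          List.map_cons, List.mem_cons]
        constructor
        · rintro ((h | rfl) | ⟨h, hx⟩)
          · tauto
          · exact Or.inr ⟨Or.inl rfl, h2⟩
          · tauto
        · rintro (h | ⟨(rfl | h), hx⟩)
          · tauto
          · tauto
          · tauto

-- membership in A's qkv-destination set
theorem pvMem_qkvA (l : List (String × String)) (q0 : PySem.Set String) (x : String) :
    x ∈ l.foldl
      (fun (q : PySem.Set String) e =>
        if PySem.Str.endswith e.2 ".q" then PySem.Set.add q e.2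
        else if PySem.Str.endswith e.2 ".k" then PySem.Set.add q e.2
        else if PySem.Str.endswith e.2 ".v" then PySem.Set.add q e.2
        else q) q0
    ↔ x ∈ q0 ∨ (x ∈ l.map Prod.snd ∧ pvIsQkv x = true) := by
  induction l generalizing q0 with
  | nil => simp
  | cons e l ih =>
    have hstep : (if PySem.Str.endswith e.2 ".q" then PySem.Set.add q0 e.2
        else if PySem.Str.endswith e.2 ".k" then PySem.Set.add q0 e.2
        else if PySem.Str.endswith e.2 ".v" then PySem.Set.add q0 e.2
        else q0) = if pvIsQkv e.2 then PySem.Set.add q0 e.2 else q0 := by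
      simp only [pvIsQkv]
      split_ifs <;> simp_all
    simp only [List.foldl_cons, hstep]
    by_cases hq : pvIsQkv e.2
    · rw [if_pos hq, ih]
      simp only [PySem.Set.mem_add, List.map_cons, List.mem_cons]
      constructor
      · rintro ((h | rfl) | ⟨h, hx⟩)
        · tauto
        · exact Or.inr ⟨Or.inl rfl, hq⟩
        · tauto
      · rintro (h | ⟨(rfl | h), hx⟩)
        · tauto
        · tauto
        · tauto
    · rw [if_neg hq, ih]
      simp only [List.map_cons, List.mem_cons]
      constructor
      · tauto
      · rintro (h | ⟨(rfl | h), hx⟩)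
        · tauto
        · exact absurd hx hq
        · tauto

-- the two components of pvKeep
def pvKeep1 (l : List (String × String)) (e : String × String) : Bool :=
  e.2 == "resid_post" || decide (e.2 ∈ l.map Prod.fst)

def pvKeep2 (l : List (String × String)) (e : String × String) : Bool :=
  !(pvIsQkv e.1) || decide (e.1 ∈ l.map Prod.snd)

theorem pvKeep_eq (l : List (String × String)) (e : String × String) :
    pvKeep l e = (pvKeep1 l e && pvKeep2 l e) := rfl

theorem pvKeep1_mono {l l' : List (String × String)} (h : ∀ x ∈ l, x ∈ l')
    {e : String × String} (hk : pvKeep1 l e = true) : pvKeep1 l' e = true := by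
  simp only [pvKeep1, Bool.or_eq_true, decide_eq_true_eq, List.mem_map] at hk ⊢
  rcases hk with h1 | ⟨a, ha, he⟩
  · exact Or.inl h1
  · exact Or.inr ⟨a, h a ha, he⟩

theorem pvKeep2_mono {l l' : List (String × String)} (h : ∀ x ∈ l, x ∈ l')
    {e : String × String} (hk : pvKeep2 l e = true) : pvKeep2 l' e = true := by
  simp only [pvKeep2, Bool.or_eq_true, decide_eq_true_eq, List.mem_map] at hk ⊢
  rcases hk with h1 | ⟨a, ha, he⟩
  · exact Or.inl h1
  · exact Or.inr ⟨a, h a ha, he⟩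

-- A's first filter predicate is pvKeep1, pointwise on members
theorem pvPA1_eq (l : List (String × String)) (e : String × String) (he : e ∈ l) :
    (!(PySem.Set.contains (PySem.Set.diff
      (l.foldl
        (fun (p : PySem.Set String × PySem.Set String) e =>
          (PySem.Set.add p.1 e.1, if e.2 != "resid_post" then PySem.Set.add p.2 e.2 else p.2))
        (PySem.Set.empty, PySem.Set.empty)).2
      (l.foldl
        (fun (p : PySem.Set String × PySem.Set String) e =>
          (PySem.Set.add p.1 e.1, if e.2 != "resid_post" then PySem.Set.add p.2 e.2 else p.2))
        (PySem.Set.empty, PySem.Set.empty)).1) e.2))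
    = pvKeep1 l e := by
  have h1 := (pvMem_fsA l PySem.Set.empty PySem.Set.empty e.2).1
  have h2 := (pvMem_fsA l PySem.Set.empty PySem.Set.empty e.2).2
  rw [Bool.eq_iff_iff]
  simp only [Bool.not_eq_eq_eq_not, Bool.not_true, PySem.Set.contains_eq_listContains,
    List.contains_eq_mem, decide_eq_false_iff_not, PySem.Set.mem_diff,
    pvKeep1, Bool.or_eq_true, beq_iff_eq, decide_eq_true_eq, PySem.Set.empty]
  have hmem : e.2 ∈ l.map Prod.snd := List.mem_map_of_mem he
  tauto

-- A's second filter predicate is pvKeep2, pointwise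
theorem pvPA2_eq (l1 : List (String × String)) (e : String × String) :
    (!((PySem.Str.endswith e.1 ".q" && !(PySem.Set.contains (l1.foldl
        (fun (q : PySem.Set String) e =>
          if PySem.Str.endswith e.2 ".q" then PySem.Set.add q e.2
          else if PySem.Str.endswith e.2 ".k" then PySem.Set.add q e.2
          else if PySem.Str.endswith e.2 ".v" then PySem.Set.add q e.2
          else q) PySem.Set.empty) e.1))
      || (PySem.Str.endswith e.1 ".k" && !(PySem.Set.contains (l1.foldl
        (fun (q : PySem.Set String) e =>
          if PySem.Str.endswith e.2 ".q" then PySem.Set.add q e.2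
          else if PySem.Str.endswith e.2 ".k" then PySem.Set.add q e.2
          else if PySem.Str.endswith e.2 ".v" then PySem.Set.add q e.2
          else q) PySem.Set.empty) e.1))
      || (PySem.Str.endswith e.1 ".v" && !(PySem.Set.contains (l1.foldl
        (fun (q : PySem.Set String) e =>
          if PySem.Str.endswith e.2 ".q" then PySem.Set.add q e.2
          else if PySem.Str.endswith e.2 ".k" then PySem.Set.add q e.2
          else if PySem.Str.endswith e.2 ".v" then PySem.Set.add q e.2
          else q) PySem.Set.empty) e.1))))
    = pvKeep2 l1 e := by
  have hm := pvMem_qkvA l1 PySem.Set.empty e.1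
  have hc : PySem.Set.contains (l1.foldl
        (fun (q : PySem.Set String) e =>
          if PySem.Str.endswith e.2 ".q" then PySem.Set.add q e.2
          else if PySem.Str.endswith e.2 ".k" then PySem.Set.add q e.2
          else if PySem.Str.endswith e.2 ".v" then PySem.Set.add q e.2
          else q) PySem.Set.empty) e.1
      = (decide (e.1 ∈ l1.map Prod.snd) && pvIsQkv e.1) := by
    rw [Bool.eq_iff_iff]
    simp only [PySem.Set.contains_eq_listContains, List.contains_eq_mem, decide_eq_true_eq,
      Bool.and_eq_true]
    rw [hm]
    simp [PySem.Set.empty]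
  rw [hc]
  cases hq : pvIsQkv e.1
  · have hq' := hq
    simp only [pvIsQkv, Bool.or_eq_false_iff] at hq'
    rw [hq'.1.1, hq'.1.2, hq'.2]
    simp [pvKeep2, hq]
  · simp only [Bool.and_true]
    simp only [pvKeep2, hq, Bool.not_true, Bool.false_or]
    have hq' := hq
    simp only [pvIsQkv] at hq'
    cases hdm : decide (e.1 ∈ l1.map Prod.snd)
    · cases h1 : PySem.Str.endswith e.1 ".q" <;>
      cases h2 : PySem.Str.endswith e.1 ".k" <;>
      cases h3 : PySem.Str.endswith e.1 ".v" <;> simp_all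
    · simp

theorem pvStepA_eq (l : List (String × String)) :
    pvStepA l = (l.filter (pvKeep1 l)).filter (pvKeep2 (l.filter (pvKeep1 l))) := by
  simp only [pvStepA]
  rw [List.filter_congr (fun e he => pvPA1_eq l e he)]
  exact List.filter_congr (fun e _ => pvPA2_eq _ e)

theorem pvStepA_mem (l : List (String × String)) (e : String × String)
    (h : e ∈ pvStepA l) : e ∈ l := by
  rw [pvStepA_eq] at h
  exact (List.mem_filter.mp ((List.mem_filter.mp h).1)).1

theorem pvStepA_length_le (l : List (String × String)) : (pvStepA l).length ≤ l.length := by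
  rw [pvStepA_eq]
  exact le_trans (List.length_filter_le _ _) (List.length_filter_le _ _)

theorem pvStepA_pres {G l : List (String × String)} (hG : pvFix G)
    (hsub : ∀ x ∈ G, x ∈ l) : ∀ x ∈ G, x ∈ pvStepA l := by
  have hGk : ∀ y ∈ G, pvKeep1 G y = true ∧ pvKeep2 G y = true := by
    intro y hy
    have hk := hG y hy
    rw [pvKeep_eq, Bool.and_eq_true] at hk
    exact hk
  have hsub1 : ∀ y ∈ G, y ∈ l.filter (pvKeep1 l) := by
    intro y hy
    exact List.mem_filter.mpr ⟨hsub y hy, pvKeep1_mono hsub (hGk y hy).1⟩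
  intro x hx
  rw [pvStepA_eq]
  exact List.mem_filter.mpr ⟨hsub1 x hx, pvKeep2_mono hsub1 (hGk x hx).2⟩

theorem pvStepA_fix_of_len (l : List (String × String))
    (h : (pvStepA l).length = l.length) : pvStepA l = l ∧ pvFix l := by
  rw [pvStepA_eq] at h
  have hs1 : (l.filter (pvKeep1 l)).Sublist l := List.filter_sublist
  have hs2 : ((l.filter (pvKeep1 l)).filter (pvKeep2 (l.filter (pvKeep1 l)))).Sublist
      (l.filter (pvKeep1 l)) := List.filter_sublist
  have hl2 := hs2.length_le
  have hl1 := hs1.length_le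
  have e1 : l.filter (pvKeep1 l) = l := hs1.eq_of_length (by omega)
  have e2 : (l.filter (pvKeep1 l)).filter (pvKeep2 (l.filter (pvKeep1 l)))
      = l.filter (pvKeep1 l) := hs2.eq_of_length (by omega)
  have hp1 : ∀ e ∈ l, pvKeep1 l e = true := List.filter_eq_self.mp e1
  have hp2 : ∀ e ∈ l, pvKeep2 l e = true := by
    have := e2
    rw [e1] at this
    exact List.filter_eq_self.mp this
  refine ⟨by rw [pvStepA_eq, e2, e1], fun e he => ?_⟩
  rw [pvKeep_eq, hp1 e he, hp2 e he]
  rfl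

theorem pvStepA_filter (l : List (String × String)) :
    ∃ p, pvStepA l = l.filter p := by
  refine ⟨fun e => pvKeep1 l e && pvKeep2 (l.filter (pvKeep1 l)) e, ?_⟩
  rw [pvStepA_eq, List.filter_filter]
  exact List.filter_congr (fun e _ => by rw [Bool.and_comm])

-- loop-level facts for A
theorem pvLoopA_mem : ∀ (fuel : Nat) (l : List (String × String)) (e : String × String),
    e ∈ pvLoopA fuel l → e ∈ l := by
  intro fuel
  induction fuel with
  | zero => intro l e h; exact h
  | succ n ih =>
    intro l e h
    simp only [pvLoopA] at h
    split at h
    · exact pvStepA_mem l e h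
    · exact pvStepA_mem l e (ih _ _ h)

theorem pvLoopA_fix : ∀ (fuel : Nat) (l : List (String × String)),
    l.length < fuel → pvFix (pvLoopA fuel l) := by
  intro fuel
  induction fuel with
  | zero => intro l h; omega
  | succ n ih =>
    intro l h
    simp only [pvLoopA]
    split
    · rename_i hlen
      have hlen' : (pvStepA l).length = l.length := (beq_iff_eq.mp hlen).symm
      obtain ⟨heq, hfix⟩ := pvStepA_fix_of_len l hlen'
      rw [heq]
      exact hfix
    · rename_i hlen
      refine ih (pvStepA l) ?_
      have := pvStepA_length_le l
      have hne : ¬ l.length = (pvStepA l).length := by simpa using hlen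
      omega

theorem pvLoopA_pres : ∀ (fuel : Nat) (l G : List (String × String)),
    pvFix G → (∀ x ∈ G, x ∈ l) → ∀ x ∈ G, x ∈ pvLoopA fuel l := by
  intro fuel
  induction fuel with
  | zero => intro l G _ hsub x hx; exact hsub x hx
  | succ n ih =>
    intro l G hG hsub x hx
    simp only [pvLoopA]
    split
    · exact pvStepA_pres hG hsub x hx
    · exact ih (pvStepA l) G hG (pvStepA_pres hG hsub) x hx

theorem pvLoopA_filter : ∀ (fuel : Nat) (l : List (String × String)),
    ∃ p, pvLoopA fuel l = l.filter p := by
  intro fuel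
  induction fuel with
  | zero => intro l; exact ⟨fun _ => true, (List.filter_true l).symm⟩
  | succ n ih =>
    intro l
    simp only [pvLoopA]
    obtain ⟨p, hp⟩ := pvStepA_filter l
    split
    · exact ⟨p, hp⟩
    · obtain ⟨q, hq⟩ := ih (pvStepA l)
      refine ⟨fun e => p e && q e, ?_⟩
      rw [hq, hp, List.filter_filter]
      exact List.filter_congr (fun e _ => by rw [Bool.and_comm])

-- ===== B-side lemmas: the worklist computes the same greatest fixed point =====

-- the counters mirror the alive multiplicities of each node as source / destination
def pvCnt (alive : List (String × String)) (sc dc : PySem.Dict String Int) : Prop :=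
  (∀ n, sc.getD n 0 = (alive.countP (fun e => e.1 == n) : Int)) ∧
  (∀ n, dc.getD n 0 = (alive.countP (fun e => e.2 == n) : Int))

-- the adjacency dicts are complete for the edge universe
def pvIdx (distinct : List (String × String))
    (into outof : PySem.Dict String (List (String × String))) : Prop :=
  (∀ x ∈ distinct, x ∈ PySem.Dict.getD into x.2 []) ∧
  (∀ x ∈ distinct, x ∈ PySem.Dict.getD outof x.1 [])

-- with exact counters, bad(e) is the negation of the keep condition over the alive set
theorem pvBad_eq {alive : List (String × String)} {sc dc : PySem.Dict String Int}
    (h : pvCnt alive sc dc) (e : String × String) :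
    pvBad sc dc e = !(pvKeep alive e) := by
  rw [pvBad, h.1 e.2, h.2 e.1]
  have hz1 : (((alive.countP (fun x => x.1 == e.2) : Int)) == 0)
      = !(decide (e.2 ∈ alive.map Prod.fst)) := by
    rw [Bool.eq_iff_iff]
    simp only [beq_iff_eq, Int.natCast_eq_zero, List.countP_eq_zero, beq_iff_eq,
      Bool.not_eq_true', decide_eq_false_iff_not, List.mem_map, not_exists]
    constructor
    · rintro hz a ⟨ha, hae⟩
      exact hz a ha hae
    · intro hz a ha hae
      exact hz a ⟨ha, hae⟩
  have hz2 : (((alive.countP (fun x => x.2 == e.1) : Int)) == 0)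
      = !(decide (e.1 ∈ alive.map Prod.snd)) := by
    rw [Bool.eq_iff_iff]
    simp only [beq_iff_eq, Int.natCast_eq_zero, List.countP_eq_zero, beq_iff_eq,
      Bool.not_eq_true', decide_eq_false_iff_not, List.mem_map, not_exists]
    constructor
    · rintro hz a ⟨ha, hae⟩
      exact hz a ha hae
    · intro hz a ha hae
      exact hz a ⟨ha, hae⟩
  rw [hz1, hz2]
  have hq3 : (PySem.Str.endswith e.1 ".q" || PySem.Str.endswith e.1 ".k"
      || PySem.Str.endswith e.1 ".v") = pvIsQkv e.1 := rfl
  rw [hq3, pvKeep]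
  cases hq : pvIsQkv e.1 <;> cases hm1 : decide (e.2 ∈ alive.map Prod.fst) <;>
    cases hm2 : decide (e.1 ∈ alive.map Prod.snd) <;>
    cases hr : (e.2 == "resid_post") <;> simp [bne, hr]

-- removing an alive edge and decrementing its endpoint counters keeps the counters exact
theorem pvCnt_discard {alive : List (String × String)} {sc dc : PySem.Dict String Int}
    (hnd : alive.Nodup) (e : String × String) (he : e ∈ alive) (h : pvCnt alive sc dc) :
    pvCnt (PySem.Set.discard alive e) (sc.modify e.1 0 (· - 1)) (dc.modify e.2 0 (· - 1)) := by
  have hdis : PySem.Set.discard alive e = alive.erase e := by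
    rw [List.Nodup.erase_eq_filter hnd]
    rfl
  have hperm := List.perm_cons_erase he
  constructor
  · intro n
    rw [PySem.Dict.getD_modify, hdis]
    have hcnt : alive.countP (fun x => x.1 == n)
        = (alive.erase e).countP (fun x => x.1 == n) + (if e.1 == n then 1 else 0) := by
      rw [hperm.countP_eq, List.countP_cons]
    by_cases hn : n = e.1
    · subst hn
      rw [if_pos rfl, h.1 e.1]
      simp at hcnt
      omega
    · rw [if_neg hn, h.1 n]
      have hne : (e.1 == n) = false := by
        simp only [beq_eq_false_iff_ne, ne_eq]
        exact fun hh => hn hh.symm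
      rw [hne] at hcnt
      simp at hcnt
      omega
  · intro n
    rw [PySem.Dict.getD_modify, hdis]
    have hcnt : alive.countP (fun x => x.2 == n)
        = (alive.erase e).countP (fun x => x.2 == n) + (if e.2 == n then 1 else 0) := by
      rw [hperm.countP_eq, List.countP_cons]
    by_cases hn : n = e.2
    · subst hn
      rw [if_pos rfl, h.2 e.2]
      simp at hcnt
      omega
    · rw [if_neg hn, h.2 n]
      have hne : (e.2 == n) = false := by
        simp only [beq_eq_false_iff_ne, ne_eq]
        exact fun hh => hn hh.symm
      rw [hne] at hcnt
      simp at hcnt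
      omega

-- the worklist only ever removes edges
theorem pvWork_mem (into outof : PySem.Dict String (List (String × String))) :
    ∀ (queue : List (String × String)) (alive : PySem.Set (String × String))
      (sc dc : PySem.Dict String Int) (x : String × String),
      x ∈ pvWork into outof queue alive sc dc → x ∈ alive := by
  intro queue alive sc dc
  induction queue, alive, sc, dc using pvWork.induct into outof with
  | case1 alive sc dc => intro x hx; rw [pvWork] at hx; exact hx
  | case2 e rest alive sc dc h ih =>
    intro x hx
    rw [pvWork, dif_pos h] at hx
    exact (PySem.Set.mem_discard alive e x).mp (ih x hx) |>.1
  | case3 e rest alive sc dc h ih =>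
    intro x hx
    rw [pvWork, dif_neg h] at hx
    exact ih x hx

-- soundness: an alive-contained fixed set survives the whole worklist
theorem pvWork_sound (into outof : PySem.Dict String (List (String × String)))
    (G : List (String × String)) (hG : pvFix G) :
    ∀ (queue : List (String × String)) (alive : PySem.Set (String × String))
      (sc dc : PySem.Dict String Int),
      alive.Nodup → pvCnt alive sc dc → (∀ x ∈ G, x ∈ alive) →
      ∀ x ∈ G, x ∈ pvWork into outof queue alive sc dc := by
  intro queue alive sc dc
  induction queue, alive, sc, dc using pvWork.induct into outof with
  | case1 alive sc dc => intro _ _ hsub x hx; rw [pvWork]; exact hsub x hx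
  | case2 e rest alive sc dc h ih =>
    intro hnd hcnt hsub x hx
    have hc : e ∈ alive ∧ pvBad sc dc e = true := by
      simpa using h
    have heG : e ∉ G := by
      intro heG
      have hk : pvKeep alive e = true := pvKeep_mono hsub (hG e heG)
      rw [pvBad_eq hcnt, hk] at hc
      simp at hc
    rw [pvWork, dif_pos h]
    refine ih (PySem.Set.nodup_discard alive e hnd)
      (pvCnt_discard hnd e hc.1 hcnt) ?_ x hx
    intro y hy
    exact (PySem.Set.mem_discard alive e y).mpr ⟨hsub y hy, fun hye => heG (hye ▸ hy)⟩
  | case3 e rest alive sc dc h ih =>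
    intro hnd hcnt hsub x hx
    rw [pvWork, dif_neg h]
    exact ih hnd hcnt hsub x hx

-- completeness: when the queue is exhausted the alive set is a fixed point
theorem pvWork_fix (into outof : PySem.Dict String (List (String × String)))
    (distinct : List (String × String)) (hidx : pvIdx distinct into outof) :
    ∀ (queue : List (String × String)) (alive : PySem.Set (String × String))
      (sc dc : PySem.Dict String Int),
      alive.Nodup → (∀ x ∈ alive, x ∈ distinct) → pvCnt alive sc dc →
      (∀ x ∈ alive, pvKeep alive x = false → x ∈ queue) →
      pvFix (pvWork into outof queue alive sc dc) := by
  intro queue alive sc dc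
  induction queue, alive, sc, dc using pvWork.induct into outof with
  | case1 alive sc dc =>
    intro _ _ _ hcmp
    rw [pvWork]
    intro x hx
    by_contra hk
    exact absurd (hcmp x hx (by simpa using hk)) (by simp)
  | case2 e rest alive sc dc h ih =>
    intro hnd hsubd hcnt hcmp
    have hc : e ∈ alive ∧ pvBad sc dc e = true := by simpa using h
    rw [pvWork, dif_pos h]
    have hdis : ∀ y, y ∈ PySem.Set.discard alive e ↔ y ∈ alive ∧ y ≠ e :=
      PySem.Set.mem_discard alive e
    refine ih (PySem.Set.nodup_discard alive e hnd)
      (fun x hx => hsubd x ((hdis x).mp hx).1)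
      (pvCnt_discard hnd e hc.1 hcnt) ?_
    intro x hx hkx
    obtain ⟨hxa, hxe⟩ := (hdis x).mp hx
    by_cases hko : pvKeep alive x = true
    · -- the keep condition for x flipped: only e's endpoints can be responsible
      rw [pvKeep_eq, Bool.and_eq_true] at hko
      rw [pvKeep_eq, Bool.and_eq_false_iff] at hkx
      rcases hkx with hkx | hkx
      · -- x.2 lost its last alive outgoing edge: that edge was e, so e.1 = x.2
        have h1o := hko.1
        simp only [pvKeep1, Bool.or_eq_true, decide_eq_true_eq, List.mem_map,
          beq_iff_eq] at h1o
        simp only [pvKeep1, Bool.or_eq_false_iff, decide_eq_false_iff_not, List.mem_map,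
          beq_eq_false_iff_ne, ne_eq, not_exists] at hkx
        rcases h1o with h1o | ⟨a, ha, hae⟩
        · exact absurd h1o hkx.1
        · have hax : a = e := by
            by_contra hane
            exact hkx.2 a ⟨(hdis a).mpr ⟨ha, hane⟩, hae⟩
          subst hax
          have hg : x ∈ PySem.Dict.getD into x.2 [] := hidx.1 x (hsubd x hxa)
          rw [hae]
          simp [hg]
      · -- x.1 lost its last alive incoming edge: that edge was e, so e.2 = x.1
        have h2o := hko.2
        simp only [pvKeep2, Bool.or_eq_true, decide_eq_true_eq, List.mem_map,
          Bool.not_eq_true'] at h2o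
        simp only [pvKeep2, Bool.or_eq_false_iff, decide_eq_false_iff_not, List.mem_map,
          not_exists] at hkx
        rcases h2o with h2o | ⟨a, ha, hae⟩
        · rw [h2o] at hkx
          exact absurd hkx.1 (by simp)
        · have hax : a = e := by
            by_contra hane
            exact hkx.2 a ⟨(hdis a).mpr ⟨ha, hane⟩, hae⟩
          subst hax
          have hg : x ∈ PySem.Dict.getD outof x.1 [] := hidx.2 x (hsubd x hxa)
          rw [hae]
          simp [hg]
    · -- already violating before: it was in the old queue, and is not e
      have hold := hcmp x hxa (by simpa using hko)
      rcases List.mem_cons.mp hold with hxe' | hxr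
      · exact absurd hxe' hxe
      · simp [hxr]
  | case3 e rest alive sc dc h ih =>
    intro hnd hsubd hcnt hcmp
    rw [pvWork, dif_neg h]
    refine ih hnd hsubd hcnt ?_
    intro x hx hkx
    have hold := hcmp x hx hkx
    rcases List.mem_cons.mp hold with hxe | hxr
    · subst hxe
      exfalso
      apply h
      rw [pvBad_eq hcnt, hkx]
      simp [PySem.Set.contains_eq_listContains, List.contains_eq_mem, hx]
    · exact hxr

-- every element of a grouping fold's bucket for its own key
theorem pvMem_group (l : List (String × String)) (key : (String × String) → String)
    (x : String × String) (hx : x ∈ l) :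
    x ∈ (l.foldl (fun d e => d.modify (key e) [] (· ++ [e])) PySem.Dict.empty).getD (key x) [] := by
  have hfold : l.foldl (fun d e => d.modify (key e) [] (· ++ [e])) PySem.Dict.empty
      = (l.map (fun e => (key e, e))).foldl
        (fun d (p : String × (String × String)) => d.modify p.1 [] (· ++ [p.2]))
        PySem.Dict.empty := by
    rw [List.foldl_map]
  rw [hfold, PySem.Dict.getD_foldl_modify_append, PySem.Dict.getD_empty]
  simp only [List.nil_append, List.mem_map, List.mem_filter]
  exact ⟨(key x, x), ⟨⟨x, hx, rfl⟩, beq_self_eq_true (key x)⟩, rfl⟩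

-- initial counters are exact
theorem pvCnt_init (distinct : List (String × String)) :
    pvCnt distinct (PySem.Dict.counter (distinct.map Prod.fst))
      (PySem.Dict.counter (distinct.map Prod.snd)) := by
  constructor
  · intro n
    rw [PySem.Dict.getD_counter, List.count_eq_countP, List.countP_map]
    rfl
  · intro n
    rw [PySem.Dict.getD_counter, List.count_eq_countP, List.countP_map]
    rfl

-- the common pruning core: A's loop equals B's worklist survivors followed by one filter
theorem pvPrune_eq (aug : List (String × String)) :
    pvLoopA (aug.length + 1) aug
    = aug.filter (fun e => PySem.Set.contains
        (pvWork
          ((PySem.List.dedup aug).foldl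
            (fun (p : PySem.Dict String (List (String × String)) × PySem.Dict String (List (String × String))) e =>
              (p.1.modify e.1 [] (· ++ [e]), p.2.modify e.2 [] (· ++ [e])))
            (PySem.Dict.empty, PySem.Dict.empty)).2
          ((PySem.List.dedup aug).foldl
            (fun (p : PySem.Dict String (List (String × String)) × PySem.Dict String (List (String × String))) e =>
              (p.1.modify e.1 [] (· ++ [e]), p.2.modify e.2 [] (· ++ [e])))
            (PySem.Dict.empty, PySem.Dict.empty)).1
          ((PySem.List.dedup aug).filter
            (pvBad (PySem.Dict.counter ((PySem.List.dedup aug).map Prod.fst))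
              (PySem.Dict.counter ((PySem.List.dedup aug).map Prod.snd))))
          (PySem.Set.ofList (PySem.List.dedup aug))
          (PySem.Dict.counter ((PySem.List.dedup aug).map Prod.fst))
          (PySem.Dict.counter ((PySem.List.dedup aug).map Prod.snd))) e) := by
  set distinct := PySem.List.dedup aug with hdd
  have hnd : distinct.Nodup := PySem.Set.nodup_ofList aug
  have hself : PySem.Set.ofList distinct = distinct := by
    rw [hdd, PySem.List.dedup]
    exact PySem.Set.ofList_eq_self_of_nodup _ (PySem.Set.nodup_ofList aug)
  set idx := distinct.foldl
    (fun (p : PySem.Dict String (List (String × String)) × PySem.Dict String (List (String × String))) e =>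
      (p.1.modify e.1 [] (· ++ [e]), p.2.modify e.2 [] (· ++ [e])))
    (PySem.Dict.empty, PySem.Dict.empty) with hidxdef
  have hsplit : idx = (distinct.foldl (fun d e => d.modify e.1 [] (· ++ [e])) PySem.Dict.empty,
      distinct.foldl (fun d e => d.modify e.2 [] (· ++ [e])) PySem.Dict.empty) := by
    rw [hidxdef]
    rw [PySem.List.foldl_prod_mk
      (f := fun (d : PySem.Dict String (List (String × String))) (e : String × String) =>
        d.modify e.1 [] (· ++ [e]))
      (g := fun (d : PySem.Dict String (List (String × String))) (e : String × String) =>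
        d.modify e.2 [] (· ++ [e]))]
  have hidx : pvIdx distinct idx.2 idx.1 := by
    rw [hsplit]
    constructor
    · intro x hx
      exact pvMem_group distinct Prod.snd x hx
    · intro x hx
      exact pvMem_group distinct Prod.fst x hx
  set sc := PySem.Dict.counter (distinct.map Prod.fst) with hscdef
  set dc := PySem.Dict.counter (distinct.map Prod.snd) with hdcdef
  have hcnt : pvCnt distinct sc dc := pvCnt_init distinct
  set R := pvWork idx.2 idx.1 (distinct.filter (pvBad sc dc)) (PySem.Set.ofList distinct) sc dc
    with hRdef
  have hRfix : pvFix R := by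
    rw [hRdef, hself]
    refine pvWork_fix idx.2 idx.1 distinct hidx _ _ _ _ hnd (fun x hx => hx) hcnt ?_
    intro x hx hkx
    refine List.mem_filter.mpr ⟨hx, ?_⟩
    rw [pvBad_eq hcnt, hkx]
    rfl
  have hRsub : ∀ x ∈ R, x ∈ aug := by
    intro x hx
    have := pvWork_mem idx.2 idx.1 _ _ _ _ x (hRdef ▸ hx)
    rw [hself] at this
    exact (PySem.List.mem_dedup aug x).mp (hdd ▸ this)
  set L := pvLoopA (aug.length + 1) aug with hLdef
  have hLfix : pvFix L := pvLoopA_fix (aug.length + 1) aug (Nat.lt_succ_self _)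
  have hLsub : ∀ x ∈ L, x ∈ aug := fun x hx => pvLoopA_mem _ aug x hx
  have hmem : ∀ x, x ∈ L ↔ x ∈ R := by
    intro x
    constructor
    · intro hx
      rw [hRdef, hself]
      refine pvWork_sound idx.2 idx.1 L hLfix _ _ _ _ hnd hcnt ?_ x hx
      intro y hy
      exact (PySem.List.mem_dedup aug y).mpr (hLsub y hy)
    · intro hx
      exact pvLoopA_pres (aug.length + 1) aug R hRfix hRsub x hx
  obtain ⟨p, hp⟩ := pvLoopA_filter (aug.length + 1) aug
  rw [← hLdef] at hp
  rw [hp]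
  refine List.filter_congr (fun e he => ?_)
  rw [Bool.eq_iff_iff]
  simp only [PySem.Set.contains_eq_listContains, List.contains_eq_mem, decide_eq_true_eq]
  constructor
  · intro hpe
    exact (hmem e).mp (hp ▸ List.mem_filter.mpr ⟨he, hpe⟩)
  · intro hin
    have hfa := (hmem e).mpr hin
    rw [hp] at hfa
    exact (List.mem_filter.mp hfa).2

-- the two attention-source tests agree on nonempty strings
theorem pvAttn_eq (s : String) (h : s.toList ≠ []) : pvAttnA s = pvAttnB s := by
  obtain ⟨c, t, hct⟩ : ∃ c t, s.toList = c :: t := by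
    cases hs : s.toList with
    | nil => exact absurd hs h
    | cons c t => exact ⟨c, t, rfl⟩
  obtain ⟨ys, d, hys⟩ : ∃ ys d, s.toList = ys ++ [d] := by
    rcases List.eq_nil_or_concat s.toList with h' | ⟨ys, d, h'⟩
    · exact absurd h' h
    · exact ⟨ys, d, by simpa using h'⟩
  have h0 : PySem.Str.pyGet? s 0 = some c := by
    rw [PySem.Str.pyGet?_eq, PySem.Chars.pyGet?_eq_listPyGet?, hct]
    simp [PySem.List.pyGet?, PySem.List.pyIdx?]
  have h1 : PySem.Str.pyGet? s (-1) = some d := by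
    rw [PySem.Str.pyGet?_eq, PySem.Chars.pyGet?_eq_listPyGet?, hys]
    exact PySem.List.pyGet?_neg_one_append_singleton ys d
  have hsw : PySem.Str.startswith s "a" = (c == 'a') := by
    rw [Bool.eq_iff_iff, PySem.Str.startswith_eq]
    rw [show "a".toList = ['a'] from rfl]
    rw [PySem.Chars.startswith_iff, hct, List.cons_prefix_cons]
    simp only [List.nil_prefix, and_true, beq_iff_eq]
    exact eq_comm
  have hew : ∀ (p : String) (a : Char), p.toList = [a] →
      PySem.Str.endswith s p = (d == a) := by
    intro p a hp
    rw [Bool.eq_iff_iff, PySem.Str.endswith_eq, hp]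
    rw [PySem.Chars.endswith_iff, hys, ← List.reverse_prefix]
    simp only [List.reverse_append, List.reverse_cons, List.reverse_nil, List.nil_append,
      List.singleton_append, List.cons_prefix_cons, List.nil_prefix, and_true, beq_iff_eq]
    exact eq_comm
  simp only [pvAttnA, pvAttnB, h0, h1, hsw, hew "q" 'q' rfl, hew "k" 'k' rfl, hew "v" 'v' rfl]
  cases hc : (c == 'a')
  · simp
  · cases hdq : (d == 'q') <;> cases hdk : (d == 'k') <;> cases hdv : (d == 'v') <;>
      simp_all

-- the attention-source accumulations of A and B are the same list
theorem pvAttnList_eq (edges : List (String × String))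
    (hne : ∀ e ∈ edges, e.1.toList ≠ []) :
    ∀ (acc : List String),
    edges.foldl
      (fun (acc : PySem.Set String) e => if pvAttnA e.1 then PySem.Set.add acc e.1 else acc)
      acc
    = edges.foldl
      (fun (acc : List String) e =>
        if pvAttnB e.1 && !(acc.contains e.1) then acc ++ [e.1] else acc)
      acc := by
  induction edges with
  | nil => intro acc; rfl
  | cons e l ih =>
    intro acc
    have hA := pvAttn_eq e.1 (hne e List.mem_cons_self)
    have hstep : (if pvAttnA e.1 then PySem.Set.add acc e.1 else acc)
        = (if pvAttnB e.1 && !(acc.contains e.1) then acc ++ [e.1] else acc) := by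
      rw [hA]
      cases hb : pvAttnB e.1
      · simp
      · simp only [Bool.true_and]
        rw [PySem.Set.add_eq_ite]
        cases hm : acc.contains e.1
        · simp only [List.contains_eq_mem, decide_eq_false_iff_not] at hm
          simp [hm]
        · simp only [List.contains_eq_mem, decide_eq_true_eq] at hm
          simp [hm]
    simp only [List.foldl_cons, hstep]
    exact ih (fun x hx => hne x (List.mem_cons_of_mem e hx)) _

theorem sanitize_edges_main : ∀ (edges : List (String × String)), Pre_sanitize_edges edges → sanitize_edges edges = sanitize_edges_alt edges := by
  intro edges hPre
  obtain ⟨hne, _⟩ := hPre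
  have hnel : ∀ e ∈ edges, e.1.toList ≠ [] := by
    intro e he hnil
    exact hne e he (String.toList_eq_nil_iff.mp hnil)
  simp only [sanitize_edges, sanitize_edges_alt]
  rw [pvAttnList_eq edges hnel PySem.Set.empty]
  exact pvPrune_eq _

-- ===== VERDICT (by name: the statement is the Claim_ definition above) =====
theorem sanitize_edges_spec : Claim_equal_sanitize_edges := by
  intro edges _ hPre
  exact sanitize_edges_main edges hPre
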